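-- pv_equiv track=rewrite | github.com/hailey-hy/Algorithm-python | Programmers/day10-1.py | solution
-- ===== SOURCE A (Python) =====
-- def change(n, toWhat):
--     result = ''
--     convertString = '0123456789ABCDEF'
--     while n:
--         result += convertString[n % toWhat]
--         n = n // toWhat
--     return result[::-1]
--
-- def solution(n, t, m, p):
--     answer = ''
--     stack = ''
--     turn = 0
--     number = -1
--     while len(answer) < t:
--         number += 1
--         if number > 0:
--             tmp = change(number, n)
--         else:
--             tmp = '0'
--         for i in tmp:
--             if turn == m:
--                 turn = 1
--             else:
--                 turn += 1
--             if turn == p: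
--                 answer += i
--             if len(answer) == t:
--                 break
--
--     return answer
-- ===== SOURCE B (Python) =====
-- def solution(n, t, m, p):
--     # B: build the concatenated base-n digit stream to exactly the needed length,
--     # then pick player p's digits by direct position arithmetic (no turn counter).
--     if t <= 0:
--         return ''
--     digits = '0123456789ABCDEF'
--
--     def rep(x):
--         if x == 0:
--             return '0'
--         def conv(y):
--             return '' if y == 0 else conv(y // n) + digits[y % n]
--         return conv(x)
--
--     needed = (t - 1) * m + p
--     game = ''
--     number = 0
--     while len(game) < needed:
--         game += rep(number)
--         number += 1
--     return ''.join(game[p - 1 + i * m] for i in range(t))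
-- ===== Notes on version B (the rewrite author's own statement) =====
-- stated objective: simpler
-- what changed: B replaces A's streaming turn-counter (per-digit branching and mid-number break) by building the concatenated base-n digit stream to the exactly needed length (t-1)*m+p and picking player p's digits by direct position arithmetic game[p-1+i*m], with a recursive base conversion instead of A's append-then-reverse loop.
-- outside the precondition, e.g. on solution(20, 1, 1, 1): A returns '0', B returns '0'; on solution(2, 1, 0, 3): A returns '1', B returns '1'; on solution(-2, 2, 1, 1): A returns '0F', B returns '0F'
import Mathlib
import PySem

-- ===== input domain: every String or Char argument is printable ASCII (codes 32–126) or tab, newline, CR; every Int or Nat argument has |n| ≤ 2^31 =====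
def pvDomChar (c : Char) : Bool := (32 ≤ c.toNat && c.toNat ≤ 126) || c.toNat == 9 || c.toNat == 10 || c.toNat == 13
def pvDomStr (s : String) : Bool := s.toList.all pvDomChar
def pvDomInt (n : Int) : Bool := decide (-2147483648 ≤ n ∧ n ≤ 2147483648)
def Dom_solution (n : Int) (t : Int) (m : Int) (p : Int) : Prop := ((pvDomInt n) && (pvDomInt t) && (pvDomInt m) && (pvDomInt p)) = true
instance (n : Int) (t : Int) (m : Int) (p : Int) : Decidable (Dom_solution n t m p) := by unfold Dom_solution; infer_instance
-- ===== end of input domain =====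

-- B replaces A's streaming turn-counter (per-digit branching, mid-number break) by building the
-- concatenated base-n digit stream to the needed length (t-1)*m+p and picking player p's digits by
-- direct position arithmetic; objective: simpler.

-- ===== PORT A =====
def pvDigits : List Char := ['0','1','2','3','4','5','6','7','8','9','A','B','C','D','E','F']

-- while n: result += convertString[n % toWhat]; n = n // toWhat   (fuel only makes it total;
-- Python raises IndexError outside Pre_, the pyGetD default is never used inside Pre_)
def changeLoop (toWhat : Int) : Nat → Int → List Char → List Char
  | 0, _, acc => acc
  | f + 1, x, acc =>
      if x ≠ 0 then
        changeLoop toWhat f (PySem.Int.floordiv x toWhat)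
          (acc ++ [PySem.List.pyGetD pvDigits (PySem.Int.mod x toWhat) '?'])
      else acc

def change (x toWhat : Int) : List Char := (changeLoop toWhat (x.natAbs + 1) x []).reverse

-- the inner 'for i in tmp' with its break at len(answer) == t
def innerLoop (t m p : Int) : List Char → Int → List Char → List Char × Int
  | [], turn, answer => (answer, turn)
  | c :: rest, turn, answer =>
      let turn' := if turn = m then 1 else turn + 1
      let answer' := if turn' = p then answer ++ [c] else answer
      if (answer'.length : Int) = t then (answer', turn')
      else innerLoop t m p rest turn' answer'

-- the outer 'while len(answer) < t' (fuel only makes it total; inside Pre_ it never runs out)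
def solLoop (n t m p : Int) : Nat → List Char → Int → Int → List Char
  | 0, answer, _, _ => answer
  | f + 1, answer, turn, number =>
      if (answer.length : Int) < t then
        let number' := number + 1
        let tmp := if number' > 0 then change number' n else ['0']
        let r := innerLoop t m p tmp turn answer
        solLoop n t m p f r.1 r.2 number'
      else answer

def solution (n : Int) (t : Int) (m : Int) (p : Int) : String :=
  String.ofList (solLoop n t m p ((t * m).toNat + 1) [] 0 (-1))

-- ===== PORT B =====
-- conv(y) = '' if y == 0 else conv(y // n) + digits[y % n]   (fuel only makes it total)
def convLoop (n : Int) : Nat → Int → List Char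
  | 0, _ => []
  | f + 1, y =>
      if y ≠ 0 then
        convLoop n f (PySem.Int.floordiv y n) ++ [PySem.List.pyGetD pvDigits (PySem.Int.mod y n) '?']
      else []

def rep (n x : Int) : List Char := if x = 0 then ['0'] else convLoop n (x.natAbs + 1) x

-- while len(game) < needed: game += rep(number); number += 1   (fuel only makes it total)
def buildLoop (n needed : Int) : Nat → List Char → Int → List Char
  | 0, game, _ => game
  | f + 1, game, number =>
      if (game.length : Int) < needed then
        buildLoop n needed f (game ++ rep n number) (number + 1)
      else game

def solution_alt (n : Int) (t : Int) (m : Int) (p : Int) : String :=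
  if t ≤ 0 then "" else
    let needed := (t - 1) * m + p
    let game := buildLoop n needed (needed.toNat + 1) [] 0
    String.ofList ((PySem.List.pyRange 0 t 1).map (fun i => PySem.List.pyGetD game (p - 1 + i * m) ' '))

-- ===== PRECONDITION & SPEC =====
-- Pre_ excludes inputs where Python A raises (base > 16: IndexError on the 16-char digit table) or
-- loops forever (n ∈ {0,1}, or p outside 1..m with t ≥ 1), and the accidental corners of A's digit
-- table outside the natural domain 2 ≤ n ≤ 16: negative bases reach the table through Python's
-- negative-index wraparound, and a base > 16 can still return when t is tiny; on t ≤ 0 A always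
-- returns '' so those inputs stay inside.
def Pre_solution (n : Int) (t : Int) (m : Int) (p : Int) : Prop :=
  t ≤ 0 ∨ (2 ≤ n ∧ n ≤ 16 ∧ 1 ≤ p ∧ p ≤ m)
instance (n : Int) (t : Int) (m : Int) (p : Int) : Decidable (Pre_solution n t m p) := by
  unfold Pre_solution; infer_instance

def pvWitness_solution : Int × Int × Int × Int := (2, 4, 2, 1)

def Spec_solution (n : Int) (t : Int) (m : Int) (p : Int) (out : String) : Prop := out = solution_alt n t m p
instance (n : Int) (t : Int) (m : Int) (p : Int) (out : String) : Decidable (Spec_solution n t m p out) := by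
  unfold Spec_solution; infer_instance

-- ===== CLAIM (what is proved, stated in full; the proofs are below) =====
def Claim_equal_solution : Prop := ∀ (n : Int) (t : Int) (m : Int) (p : Int), Dom_solution n t m p → Pre_solution n t m p → Spec_solution n t m p (solution n t m p)

-- ===== LEMMAS AND PROOFS =====

-- the digit stream: base-n representations of 0,1,2,… concatenated
def stream (n : Int) : Nat → List Char
  | 0 => []
  | k + 1 => stream n k ++ rep n k

-- every m-th element, starting with the head
def strideN : List Char → Nat → List Char
  | [], _ => []
  | c :: rest, s => c :: strideN (rest.drop (s - 1)) s
  termination_by xs _ => xs.length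
  decreasing_by
    simp only [List.length_drop, List.length_cons]
    omega

@[simp] theorem strideN_nil (s : Nat) : strideN [] s = [] := strideN.eq_1 s

theorem strideN_cons (c : Char) (rest : List Char) (s : Nat) :
    strideN (c :: rest) s = c :: strideN (rest.drop (s - 1)) s := by rw [strideN.eq_2]

-- A's append-then-reverse conversion is B's recursive conversion
theorem changeLoop_eq (tw : Int) : ∀ (f : Nat) (x : Int) (acc : List Char),
    changeLoop tw f x acc = acc ++ (convLoop tw f x).reverse := by
  intro f
  induction f with
  | zero => intro x acc; simp [changeLoop, convLoop]
  | succ f ih =>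
      intro x acc
      by_cases hx : x = 0
      · simp [changeLoop, convLoop, hx]
      · simp [changeLoop, convLoop, hx, ih]

theorem change_eq_rep (n x : Int) (hx : 0 < x) : change x n = rep n x := by
  rw [rep, if_neg (by omega : ¬ x = 0), change, changeLoop_eq]
  simp

theorem rep_ne_nil (n x : Int) : rep n x ≠ [] := by
  by_cases hx : x = 0
  · simp [rep, hx]
  · simp [rep, hx, convLoop]

theorem stream_length_ge (n : Int) : ∀ k : Nat, k ≤ (stream n k).length := by
  intro k
  induction k with
  | zero => simp [stream]
  | succ k ih =>
      have h := rep_ne_nil n (k : Int)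
      have : 1 ≤ (rep n (k : Int)).length := by
        cases hr : rep n (k : Int) with
        | nil => exact absurd hr h
        | cons a l => simp
      simp only [stream, List.length_append]
      omega

theorem stream_prefix (n : Int) : ∀ (k j : Nat), ∃ ext, stream n (k + j) = stream n k ++ ext := by
  intro k j
  induction j with
  | zero => exact ⟨[], by simp⟩
  | succ j ih =>
      obtain ⟨ext, hext⟩ := ih
      exact ⟨ext ++ rep n ((k + j : Nat) : Int), by simp [stream, hext]⟩

-- break composes: running the inner loop over a concatenation
theorem inner_append (t m p : Int) : ∀ (cs1 cs2 : List Char) (turn : Int) (a : List Char),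
    (a.length : Int) < t →
    innerLoop t m p (cs1 ++ cs2) turn a =
      (let r := innerLoop t m p cs1 turn a
       if (r.1.length : Int) = t then r else innerLoop t m p cs2 r.2 r.1) := by
  intro cs1
  induction cs1 with
  | nil =>
      intro cs2 turn a ha
      have hne : ¬ ((a.length : Int) = t) := by omega
      simp [innerLoop, hne]
  | cons c rest ih =>
      intro cs2 turn a ha
      simp only [List.cons_append, innerLoop]
      set turn' := if turn = m then 1 else turn + 1 with hturn'
      set a' := if turn' = p then a ++ [c] else a with ha'
      by_cases hlen : (a'.length : Int) = t
      · simp [hlen]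
      · have ha'lt : (a'.length : Int) < t := by
          have : a'.length ≤ a.length + 1 := by
            rw [ha']; split <;> simp
          omega
        simp only [hlen, if_false]
        exact ih cs2 turn' a' ha'lt

-- (x - 1) drops the gap by one, modulo m
theorem gap_facts (m p turn turn' : Int) (hm1 : 1 ≤ m) (hp1 : 1 ≤ p) (hpm : p ≤ m)
    (h0 : 0 ≤ turn) (htm : turn ≤ m) (hT : turn' = if turn = m then 1 else turn + 1) :
    ((turn' = p ↔ (p - turn - 1) % m = 0) ∧
     (turn' ≠ p → (p - turn' - 1) % m = (p - turn - 1) % m - 1 ∧ 1 ≤ (p - turn - 1) % m) ∧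
     1 ≤ turn' ∧ turn' ≤ m ∧ (turn' = p → (p - turn' - 1) % m = m - 1)) := by
  have hb : 1 ≤ turn' ∧ turn' ≤ m := by
    by_cases h : turn = m <;> simp [h] at hT <;> omega
  have hcong : (p - turn - 1) % m = (p - turn') % m := by
    by_cases h : turn = m
    · have hT1 : turn' = 1 := by simp [h] at hT; exact hT
      rw [hT1, h]
      have e : p - m - 1 = (p - 1) + (-1) * m := by ring
      rw [e, Int.add_mul_emod_self_right]
    · simp [h] at hT
      have : p - turn - 1 = p - turn' := by omega
      rw [this]
  set x := p - turn' with hxdef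
  have hxb : -m < x ∧ x < m := by omega
  have hzero : x % m = 0 ↔ x = 0 := by
    constructor
    · intro h
      obtain ⟨c, hc⟩ := Int.dvd_of_emod_eq_zero h
      rcases lt_trichotomy c 0 with hc0 | hc0 | hc0
      · nlinarith
      · subst hc0; simpa using hc
      · nlinarith
    · intro h; simp [h]
  refine ⟨?_, ?_, hb.1, hb.2, ?_⟩
  · rw [hcong]; constructor
    · intro h; rw [hzero]; omega
    · intro h; rw [hzero] at h; omega
  · intro hne
    have hxne : x ≠ 0 := by omega
    have hpos : 1 ≤ x % m := by
      have hnn := Int.emod_nonneg x (by omega : m ≠ 0)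
      rcases lt_or_eq_of_le hnn with h | h
      · omega
      · exact absurd (hzero.mp h.symm) hxne
    have hlt : x % m < m := Int.emod_lt_of_pos x (by omega)
    have hm2 : 2 ≤ m := by
      by_contra hh
      have : m = 1 := by omega
      subst this
      omega
    have hstep : (x - 1) % m = x % m - 1 := by
      rw [Int.sub_emod]
      have h1 : (1 : Int) % m = 1 := Int.emod_eq_of_lt (by omega) (by omega)
      rw [h1]
      exact Int.emod_eq_of_lt (by omega) (by omega)
    have hx1 : p - turn' - 1 = x - 1 := by omega
    rw [hcong, hx1, hstep]
    exact ⟨rfl, hpos⟩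
  · intro h
    have hx1 : p - turn' - 1 = -1 := by omega
    rw [hx1]
    have : (-1 : Int) = (m - 1) + (-1) * m := by ring
    rw [this, Int.add_mul_emod_self_right]
    exact Int.emod_eq_of_lt (by omega) (by omega)

-- the inner loop collects exactly every m-th digit, starting after the current gap
theorem inner_stride (t m p : Int) (hm1 : 1 ≤ m) (hp1 : 1 ≤ p) (hpm : p ≤ m) :
    ∀ (D : List Char) (turn : Int) (a : List Char), 0 ≤ turn → turn ≤ m → (a.length : Int) < t →
    (innerLoop t m p D turn a).1 =
      a ++ (strideN (D.drop ((p - turn - 1) % m).toNat) m.toNat).take (t - a.length).toNat := by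
  intro D
  induction D with
  | nil => intro turn a _ _ _; simp [innerLoop]
  | cons c rest ih =>
      intro turn a h0 htm ha
      simp only [innerLoop]
      set turn' := if turn = m then 1 else turn + 1 with hturn'
      obtain ⟨Hiff, Hdec, Ht1, Ht2, Hwrap⟩ :=
        gap_facts m p turn turn' hm1 hp1 hpm h0 htm hturn'
      by_cases hcol : turn' = p
      · -- collect this digit
        have hg0 : ((p - turn - 1) % m).toNat = 0 := by
          have := Hiff.mp hcol; omega
        have hdrop : (c :: rest).drop ((p - turn - 1) % m).toNat = c :: rest := by
          rw [hg0]; rfl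
        rw [hdrop]
        have hstride := strideN_cons c rest m.toNat
        have htake1 : 1 ≤ (t - a.length).toNat := by omega
        have hlen' : (((a ++ [c]).length : Nat) : Int) = (a.length : Int) + 1 := by
          simp
        simp only [hcol, ite_true]
        by_cases hdone : ((a ++ [c]).length : Int) = t
        · simp only [hdone, ite_true]
          have hd2 : (a.length : Int) + 1 = t := by rw [← hlen']; exact hdone
          have h1 : (t - (a.length : Int)).toNat = 1 := by omega
          rw [hstride, h1]
          simp
        · simp only [hdone, if_false]
          have hne2 : ¬ ((a.length : Int) + 1 = t) := by rw [← hlen']; exact hdone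
          have ha' : (((a ++ [c]).length : Int)) < t := by rw [hlen']; omega
          have hrec := ih turn' (a ++ [c]) (by omega) (by omega) ha'
          have hgap' : ((p - turn' - 1) % m).toNat = m.toNat - 1 := by
            rw [Hwrap hcol]; omega
          rw [hgap'] at hrec
          rw [hcol] at hrec
          rw [hrec, hstride]
          have hcount : (t - ((a ++ [c]).length : Int)).toNat + 1 = (t - a.length).toNat := by
            rw [hlen']; omega
          rw [← hcount]
          simp [List.take_succ_cons]
      · -- skip this digit
        obtain ⟨Hd, Hge1⟩ := Hdec hcol
        have hg : 1 ≤ ((p - turn - 1) % m).toNat := by omega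
        have hdrop : (c :: rest).drop ((p - turn - 1) % m).toNat =
            rest.drop (((p - turn - 1) % m).toNat - 1) := by
          cases hgn : ((p - turn - 1) % m).toNat with
          | zero => omega
          | succ g => simp
        simp only [hcol, if_false]
        have hne : ¬ ((a.length : Int) = t) := by omega
        simp only [hne, if_false]
        have hrec := ih turn' a (by omega) (by omega) ha
        have hgap' : ((p - turn' - 1) % m).toNat = ((p - turn - 1) % m).toNat - 1 := by
          rw [Hd]; omega
        rw [hrec, hgap', hdrop]

-- indexing into the stride
theorem strideN_getElem? (mN : Nat) (hm : 1 ≤ mN) :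
    ∀ (i : Nat) (xs : List Char), (strideN xs mN)[i]? = xs[i * mN]? := by
  intro i
  induction i with
  | zero =>
      intro xs
      cases xs with
      | nil => simp
      | cons c rest => simp [strideN_cons]
  | succ i ih =>
      intro xs
      cases xs with
      | nil => simp
      | cons c rest =>
          have hmn : (i + 1) * mN = (mN - 1 + i * mN) + 1 := by
            cases mN with
            | zero => omega
            | succ mm => ring_nf; omega
          rw [strideN_cons, List.getElem?_cons_succ, ih, List.getElem?_drop, hmn,
            List.getElem?_cons_succ]

-- ===== main equivalence =====

-- the first t strided picks only depend on a long-enough prefix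
theorem take_stride_prefix (mN tN : Nat) (hm : 1 ≤ mN) (D E : List Char)
    (hD : (tN - 1) * mN + 1 ≤ D.length) :
    (strideN (D ++ E) mN).take tN = (strideN D mN).take tN := by
  apply List.ext_getElem?
  intro i
  rw [List.getElem?_take, List.getElem?_take]
  by_cases hi : i < tN
  · simp only [hi, ite_true]
    rw [strideN_getElem? mN hm, strideN_getElem? mN hm]
    apply List.getElem?_append_left
    have : i * mN ≤ (tN - 1) * mN := Nat.mul_le_mul_right mN (by omega)
    omega
  · simp [hi]

-- the strided selection has at least tN elements when the source is long enough
theorem stride_len_ge (mN tN : Nat) (hm : 1 ≤ mN) (ht1 : 1 ≤ tN) (D : List Char)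
    (hD : (tN - 1) * mN + 1 ≤ D.length) : tN ≤ (strideN D mN).length := by
  have h1 : (tN - 1) * mN < D.length := by omega
  have h2 : (strideN D mN)[tN - 1]? = D[(tN - 1) * mN]? := strideN_getElem? mN hm (tN - 1) D
  have h3 : D[(tN - 1) * mN]? = some D[(tN - 1) * mN] := List.getElem?_eq_getElem h1
  have h4 : (tN - 1) < (strideN D mN).length := by
    by_contra hc
    rw [List.getElem?_eq_none (by omega)] at h2
    rw [h3] at h2
    simp at h2
  omega

-- what the inner loop computes on a whole stream, from the initial state
theorem inner_stream (n t m p : Int) (hm1 : 1 ≤ m) (hp1 : 1 ≤ p) (hpm : p ≤ m) (ht : 1 ≤ t)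
    (k : Nat) :
    (innerLoop t m p (stream n k) 0 []).1 =
      ((strideN ((stream n k).drop (p - 1).toNat) m.toNat).take t.toNat) := by
  have h := inner_stride t m p hm1 hp1 hpm (stream n k) 0 []
    le_rfl (by omega) (by simp; omega)
  have hq : (p - 0 - 1) % m = p - 1 := by
    have : p - 0 - 1 = p - 1 := by ring
    rw [this]
    exact Int.emod_eq_of_lt (by omega) (by omega)
  rw [h, hq]
  simp

-- helper inequality: the needed prefix length, in Nat form
theorem needed_split (t m p : Int) (hm1 : 1 ≤ m) (hp1 : 1 ≤ p) (ht : 1 ≤ t) :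
    (t.toNat - 1) * m.toNat + 1 + (p - 1).toNat = ((t - 1) * m + p).toNat := by
  have h1 : ((t.toNat - 1 : Nat) : Int) = t - 1 := by omega
  have h2 : ((m.toNat : Nat) : Int) = m := by omega
  have h3 : (((p - 1).toNat : Nat) : Int) = p - 1 := by omega
  have h4 : (((t - 1) * m + p).toNat : Int) = (t - 1) * m + p := by
    rw [Int.toNat_of_nonneg]
    nlinarith
  have key : (((t.toNat - 1) * m.toNat + 1 + (p - 1).toNat : Nat) : Int) =
      ((((t - 1) * m + p).toNat : Nat) : Int) := by
    push_cast [h1, h2, h3]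
    rw [h4]
    ring
  exact_mod_cast key

-- the answer, once the stream is long enough, has exactly t digits
theorem answer_len (n t m p : Int) (hm1 : 1 ≤ m) (hp1 : 1 ≤ p) (hpm : p ≤ m) (ht : 1 ≤ t)
    (k : Nat) (hk : (t - 1) * m + p ≤ ((stream n k).length : Int)) :
    ((innerLoop t m p (stream n k) 0 []).1.length : Int) = t := by
  rw [inner_stream n t m p hm1 hp1 hpm ht k]
  have hD : (t.toNat - 1) * m.toNat + 1 ≤ ((stream n k).drop (p - 1).toNat).length := by
    have hs := needed_split t m p hm1 hp1 ht
    simp only [List.length_drop]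
    generalize (t.toNat - 1) * m.toNat = A at hs ⊢
    omega
  have hge := stride_len_ge m.toNat t.toNat (by omega) (by omega) _ hD
  rw [List.length_take]
  omega

-- the answer never exceeds t digits
theorem answer_le (n t m p : Int) (hm1 : 1 ≤ m) (hp1 : 1 ≤ p) (hpm : p ≤ m) (ht : 1 ≤ t)
    (k : Nat) :
    ((innerLoop t m p (stream n k) 0 []).1.length : Int) ≤ t := by
  rw [inner_stream n t m p hm1 hp1 hpm ht k]
  rw [List.length_take]
  omega

-- the answer does not depend on how far the stream was built, past the needed length
theorem answer_indep (n t m p : Int) (hm1 : 1 ≤ m) (hp1 : 1 ≤ p) (ht : 1 ≤ t)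
    (k k' : Nat) (hk : (t - 1) * m + p ≤ ((stream n k).length : Int)) (hkk : k ≤ k') :
    (strideN ((stream n k').drop (p - 1).toNat) m.toNat).take t.toNat =
    (strideN ((stream n k).drop (p - 1).toNat) m.toNat).take t.toNat := by
  obtain ⟨ext, hext⟩ := stream_prefix n k (k' - k)
  have hkn : k + (k' - k) = k' := by omega
  rw [hkn] at hext
  have hsplit := needed_split t m p hm1 hp1 ht
  have hqle : (p - 1).toNat ≤ (stream n k).length := by
    generalize (t.toNat - 1) * m.toNat = A at hsplit
    omega
  rw [hext, List.drop_append_of_le_length hqle]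
  apply take_stride_prefix m.toNat t.toNat (by omega)
  simp only [List.length_drop]
  generalize (t.toNat - 1) * m.toNat = A at hsplit ⊢
  omega

-- the outer loop, run to completion, computes the full-stream answer
theorem solLoop_eq (n t m p : Int) (hm1 : 1 ≤ m) (hp1 : 1 ≤ p) (hpm : p ≤ m) (ht : 1 ≤ t) :
    ∀ (f : Nat) (k : Nat) (a : List Char) (turn : Int),
    k ≤ ((t - 1) * m + p).toNat → ((t - 1) * m + p).toNat - k < f →
    innerLoop t m p (stream n k) 0 [] = (a, turn) →
    solLoop n t m p f a turn ((k : Int) - 1) =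
      (innerLoop t m p (stream n ((t - 1) * m + p).toNat) 0 []).1 := by
  set N := ((t - 1) * m + p).toNat with hN
  intro f
  induction f with
  | zero => intro k a turn hkN hfuel _; omega
  | succ f ihf =>
      intro k a turn hkN hfuel hinner
      simp only [solLoop]
      by_cases hlt : (a.length : Int) < t
      · rw [if_pos hlt]
        have hstreamN : (t - 1) * m + p ≤ ((stream n N).length : Int) := by
          have := stream_length_ge n N
          omega
        have hkN' : k < N := by
          rcases Nat.lt_or_ge k N with h | h
          · exact h
          · exfalso
            have hk : k = N := by omega
            have := answer_len n t m p hm1 hp1 hpm ht k (by rw [hk]; exact hstreamN)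
            rw [hinner] at this
            simp at this
            omega
        have hnumber : ((k : Int) - 1) + 1 = (k : Int) := by ring
        have htmp : (if ((k : Int) - 1) + 1 > 0 then change (((k : Int) - 1) + 1) n else ['0']) =
            rep n (k : Int) := by
          rw [hnumber]
          by_cases hk0 : k = 0
          · subst hk0
            simp [rep]
          · have : (0 : Int) < (k : Int) := by
              have : 0 < k := Nat.pos_of_ne_zero hk0
              exact_mod_cast this
            rw [if_pos (by omega), change_eq_rep n (k : Int) this]
        have hstep : innerLoop t m p (stream n (k + 1)) 0 [] =
            innerLoop t m p (rep n (k : Int)) turn a := by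
          show innerLoop t m p (stream n k ++ rep n (k : Int)) 0 [] = _
          rw [inner_append t m p (stream n k) (rep n (k : Int)) 0 [] (by simp; omega)]
          rw [hinner]
          have : ¬ ((a.length : Int) = t) := by omega
          simp [this]
        rw [htmp]
        have hpair : innerLoop t m p (stream n (k + 1)) 0 [] =
            ((innerLoop t m p (rep n (k : Int)) turn a).1,
             (innerLoop t m p (rep n (k : Int)) turn a).2) := by
          rw [hstep]
        have hrec := ihf (k + 1) (innerLoop t m p (rep n (k : Int)) turn a).1
          (innerLoop t m p (rep n (k : Int)) turn a).2 (by omega) (by omega) hpair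
        have hcast : (((k + 1 : Nat)) : Int) - 1 = ((k : Int) - 1) + 1 := by push_cast; ring
        rw [hcast] at hrec
        exact hrec
      · rw [if_neg hlt]
        obtain ⟨ext, hext⟩ := stream_prefix n k (N - k)
        have hkn : k + (N - k) = N := by omega
        rw [hkn] at hext
        have hsplit := inner_append t m p (stream n k) ext 0 [] (by simp; omega)
        rw [hext, hsplit, hinner]
        have hle := answer_le n t m p hm1 hp1 hpm ht k
        rw [hinner] at hle
        simp at hle
        have heq : (a.length : Int) = t := by omega
        simp [heq]

-- the stream built by B reaches the needed length and is a stream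
theorem buildLoop_stream (n needed : Int) : ∀ (f : Nat) (k : Nat),
    ∃ K : Nat, k ≤ K ∧ buildLoop n needed f (stream n k) (k : Int) = stream n K ∧
      (needed ≤ ((stream n k).length : Int) + f → needed ≤ ((stream n K).length : Int)) := by
  intro f
  induction f with
  | zero =>
      intro k
      exact ⟨k, le_rfl, rfl, by intro h; simpa using h⟩
  | succ f ihf =>
      intro k
      by_cases h : ((stream n k).length : Int) < needed
      · obtain ⟨K, hkK, hbuild, hlen⟩ := ihf (k + 1)
        refine ⟨K, by omega, ?_, ?_⟩
        · simp only [buildLoop, h, ite_true]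
          have : stream n k ++ rep n (k : Int) = stream n (k + 1) := rfl
          rw [this]
          have hc : ((k : Int) + 1) = ((k + 1 : Nat) : Int) := by push_cast; ring
          rw [hc]
          exact hbuild
        · intro hneed
          apply hlen
          have hlen1 : (stream n k).length + 1 ≤ (stream n (k + 1)).length := by
            have h := rep_ne_nil n (k : Int)
            have : 1 ≤ (rep n (k : Int)).length := by
              cases hr : rep n (k : Int) with
              | nil => exact absurd hr h
              | cons a l => simp
            simp only [stream, List.length_append]
            omega
          push_cast at hneed
          omega
      · exact ⟨k, le_rfl, by simp only [buildLoop, h, if_false], by intro _; omega⟩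

-- B's direct indexing equals the strided selection
theorem alt_list_eq (t m p : Int) (hm1 : 1 ≤ m) (hp1 : 1 ≤ p) (ht : 1 ≤ t)
    (game : List Char) (hlen : (t - 1) * m + p ≤ (game.length : Int)) :
    (PySem.List.pyRange 0 t 1).map (fun i => PySem.List.pyGetD game (p - 1 + i * m) ' ') =
      (strideN (game.drop (p - 1).toNat) m.toNat).take t.toNat := by
  have hsplit := needed_split t m p hm1 hp1 ht
  have htcast : ((t.toNat : Nat) : Int) = t := by omega
  have hrange : PySem.List.pyRange 0 t 1 = (List.range t.toNat).map (fun k : Nat => (k : Int)) := by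
    have h := PySem.List.pyRange_zero_natCast t.toNat
    rw [htcast] at h
    exact h
  rw [hrange, List.map_map]
  apply List.ext_getElem?
  intro i
  rw [List.getElem?_take]
  by_cases hi : i < t.toNat
  · rw [if_pos hi, List.getElem?_map, List.getElem?_range hi]
    simp only [Option.map_some, Function.comp_apply]
    rw [strideN_getElem? m.toNat (by omega), List.getElem?_drop]
    have h5 : i * m.toNat ≤ (t.toNat - 1) * m.toNat := Nat.mul_le_mul_right _ (by omega)
    have hb : (p - 1).toNat + i * m.toNat < game.length := by
      have hlen' : ((t - 1) * m + p).toNat ≤ game.length := by omega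
      generalize hA : (t.toNat - 1) * m.toNat = A at h5 hsplit
      generalize hB : i * m.toNat = B at h5 ⊢
      omega
    have e1 : (((p - 1).toNat : Nat) : Int) = p - 1 := by omega
    have e2 : ((m.toNat : Nat) : Int) = m := by omega
    have hidxI : p - 1 + (i : Int) * m = (((p - 1).toNat + i * m.toNat : Nat) : Int) := by
      push_cast [e1, e2]
      ring
    have h0 : (0 : Int) ≤ p - 1 + (i : Int) * m := by
      rw [hidxI]
      exact Int.natCast_nonneg _
    have h1' : p - 1 + (i : Int) * m < (game.length : Int) := by
      rw [hidxI]
      exact_mod_cast hb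
    rw [PySem.List.pyGetD_eq_getElem game ' ' h0 h1']
    have hidxN : (p - 1 + (i : Int) * m).toNat = (p - 1).toNat + i * m.toNat := by
      rw [hidxI, Int.toNat_natCast]
    rw [← List.getElem?_eq_getElem (show (p - 1 + (i : Int) * m).toNat < game.length by
      rw [hidxN]; exact hb)]
    rw [hidxN]
  · rw [if_neg hi]
    apply List.getElem?_eq_none
    simp only [List.length_map, List.length_range]
    omega

-- ===== VERDICT (by name: the statement is the Claim_ definition above) =====
theorem solution_spec : Claim_equal_solution := by
  intro n t m p hdom hpre
  unfold Spec_solution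
  by_cases ht0 : t ≤ 0
  · have hA : solution n t m p = String.ofList [] := by
      unfold solution
      have hcond : ¬ ((0 : Int) < t) := by omega
      simp [solLoop, hcond]
    rw [hA]
    unfold solution_alt
    rw [if_pos ht0]
  · have hpre' : 2 ≤ n ∧ n ≤ 16 ∧ 1 ≤ p ∧ p ≤ m := by
      cases hpre with
      | inl h => omega
      | inr h => exact h
    obtain ⟨hn2, hn16, hp1, hpm⟩ := hpre'
    have ht : 1 ≤ t := by omega
    have hm1 : 1 ≤ m := by omega
    have hNpos : 1 ≤ (t - 1) * m + p := by nlinarith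
    have hinit : innerLoop t m p (stream n 0) 0 [] = ([], 0) := rfl
    have hfuelN : ((t - 1) * m + p).toNat - 0 < (t * m).toNat + 1 := by
      have h1 : (t - 1) * m + p ≤ t * m := by nlinarith
      generalize hTM : t * m = TM at h1 ⊢
      generalize hNI : (t - 1) * m + p = NI at h1 ⊢
      omega
    have hA := solLoop_eq n t m p hm1 hp1 hpm ht ((t * m).toNat + 1) 0 [] 0
      (Nat.zero_le _) hfuelN hinit
    have hc0 : (((0 : Nat)) : Int) - 1 = (-1 : Int) := by norm_num
    rw [hc0] at hA
    have hAns := inner_stream n t m p hm1 hp1 hpm ht ((t - 1) * m + p).toNat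
    obtain ⟨K, h0K, hgame, hlenK⟩ := buildLoop_stream n ((t - 1) * m + p) (((t - 1) * m + p).toNat + 1) 0
    have hgame' : buildLoop n ((t - 1) * m + p) (((t - 1) * m + p).toNat + 1) [] 0 = stream n K := by
      have hstream0 : stream n 0 = ([] : List Char) := rfl
      rw [hstream0] at hgame
      simpa using hgame
    have hKlen : (t - 1) * m + p ≤ ((stream n K).length : Int) := by
      apply hlenK
      have hstream0 : stream n 0 = ([] : List Char) := rfl
      rw [hstream0]
      simp
      omega
    have hNlen : (t - 1) * m + p ≤ ((stream n ((t - 1) * m + p).toNat).length : Int) := by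
      have := stream_length_ge n ((t - 1) * m + p).toNat
      omega
    unfold solution solution_alt
    rw [if_neg ht0]
    rw [hA, hAns]
    apply congrArg String.ofList
    rw [hgame']
    rw [alt_list_eq t m p hm1 hp1 ht (stream n K) hKlen]
    rcases le_total K ((t - 1) * m + p).toNat with hKN | hKN
    · exact answer_indep n t m p hm1 hp1 ht K ((t - 1) * m + p).toNat hKlen hKN
    · exact (answer_indep n t m p hm1 hp1 ht ((t - 1) * m + p).toNat K hNlen hKN).symm
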